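-- pv_equiv track=rewrite | github.com/kshmawj111/programmers | lv2/삼각달팽이.py | fill_triangle
-- ===== SOURCE A (Python) =====
-- def fill_triangle(n, start_num):
--     triangle_array = [[] for _ in range(n)]
--     n = len(triangle_array)
--     x = start_num
--
--     if n != 1:
--         end_num = x+3*(n-1)-1
--
--     else:
--         end_num = x+1
--
--     while x < end_num:
--         for i in range(n-1):
--             triangle_array[i].append(x)
--             x += 1
--
--         while len(triangle_array[n-1]) != n:
--             triangle_array[n-1].append(x)
--             x += 1
--
--         for i in range(n-2, 0, -1):
--             triangle_array[i].append(x)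
--             x += 1
--
--     return triangle_array
-- ===== SOURCE B (Python) =====
-- def fill_triangle(n, start_num):
--     # Direct per-row construction: the outer while loop of A runs exactly once,
--     # so each row's contents follow a closed formula.
--     if n <= 0:
--         return []
--     if n == 1:
--         return [[start_num]]
--     middle = [[start_num + i, start_num + 3 * n - 3 - i] for i in range(1, n - 1)]
--     bottom = [start_num + n - 1 + j for j in range(n)]
--     return [[start_num]] + middle + [bottom]
-- ===== Notes on version B (the rewrite author's own statement) =====
-- stated objective: simpler
-- what changed: Replaces the path-simulating while/for loops (which in fact run exactly once) with a direct closed-form construction of each row: left edge, mirrored middle pairs, and the bottom row.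
import Mathlib
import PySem

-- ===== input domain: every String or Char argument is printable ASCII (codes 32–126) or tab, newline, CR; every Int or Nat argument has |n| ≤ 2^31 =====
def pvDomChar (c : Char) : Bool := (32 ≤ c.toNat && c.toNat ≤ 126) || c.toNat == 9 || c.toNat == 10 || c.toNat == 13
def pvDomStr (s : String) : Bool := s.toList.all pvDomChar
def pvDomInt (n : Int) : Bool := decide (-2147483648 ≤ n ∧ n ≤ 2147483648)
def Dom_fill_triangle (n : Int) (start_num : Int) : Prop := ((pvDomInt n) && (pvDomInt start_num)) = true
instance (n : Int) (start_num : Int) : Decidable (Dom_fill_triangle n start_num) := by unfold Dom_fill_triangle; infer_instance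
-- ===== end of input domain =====

-- B replaces A's path simulation (whose outer while loop runs exactly once) by a direct
-- per-row closed-form construction; same O(n) cost, simpler shape.

-- ===== PORT A =====
-- 'triangle_array[i].append(x); x += 1' on state (array, x)
def pvAppendAt (st : List (List Int) × Int) (i : Nat) : List (List Int) × Int :=
  (st.1.modify i (fun r => r ++ [st.2]), st.2 + 1)

-- range(n-2, 0, -1): both endpoints are nonnegative here, so this Nat countdown is exact
def pvDescRange : Nat → List Nat
  | 0 => []
  | m+1 => (m+1) :: pvDescRange m

-- 'while len(triangle_array[n-1]) != n: append x; x += 1' (fuel-bounded; fuel n suffices since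
-- the row starts empty on every reachable state)
def pvFillBottom (idx target : Nat) : Nat → List (List Int) × Int → List (List Int) × Int
  | 0, st => st
  | fuel+1, st =>
    if (st.1.getD idx []).length ≠ target then
      pvFillBottom idx target fuel (pvAppendAt st idx)
    else st

-- the outer 'while x < end_num' with its three inner loops, fuel-bounded
def pvOuter (k : Nat) (end_num : Int) : Nat → List (List Int) × Int → List (List Int) × Int
  | 0, st => st
  | fuel+1, st =>
    if st.2 < end_num then
      let st1 := (List.range (k-1)).foldl pvAppendAt st
      let st2 := pvFillBottom (k-1) k k st1
      let st3 := (pvDescRange (k-2)).foldl pvAppendAt st2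
      pvOuter k end_num fuel st3
    else st

def fill_triangle (n : Int) (start_num : Int) : List (List Int) :=
  let triangle_array := List.replicate n.toNat ([] : List Int)
  let k := triangle_array.length          -- n = len(triangle_array)
  let x := start_num
  let end_num := if (k : Int) ≠ 1 then x + 3*((k : Int) - 1) - 1 else x + 1
  -- x strictly increases each outer iteration on every reachable state, so this fuel suffices
  (pvOuter k end_num ((end_num - x).toNat + 1) (triangle_array, x)).1

-- ===== PORT B =====
def fill_triangle_alt (n : Int) (start_num : Int) : List (List Int) :=
  if n ≤ 0 then []
  else if n = 1 then [[start_num]]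
  else
    let middle := (List.range (n.toNat - 2)).map
      (fun (i : Nat) => [start_num + ((i : Int) + 1), start_num + 3*n - 3 - ((i : Int) + 1)])
    let bottom := (List.range n.toNat).map (fun (j : Nat) => start_num + n - 1 + (j : Int))
    [[start_num]] ++ middle ++ [bottom]

-- ===== PRECONDITION & SPEC =====
def Spec_fill_triangle (n : Int) (start_num : Int) (out : List (List Int)) : Prop := out = fill_triangle_alt n start_num
instance (n : Int) (start_num : Int) (out : List (List Int)) : Decidable (Spec_fill_triangle n start_num out) := by unfold Spec_fill_triangle; infer_instance

-- ===== CLAIM (what is proved, stated in full; the proofs are below) =====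
def Claim_equal_fill_triangle : Prop := ∀ (n : Int) (start_num : Int), Dom_fill_triangle n start_num → Spec_fill_triangle n start_num (fill_triangle n start_num)

-- ===== LEMMAS AND PROOFS =====

theorem pvOuter_stop (k : Nat) (e : Int) (fuel : Nat) (st : List (List Int) × Int)
    (h : ¬ st.2 < e) : pvOuter k e fuel st = st := by
  cases fuel <;> simp [pvOuter, h]

theorem foldl_app_snd (L : List Nat) (st : List (List Int) × Int) :
    (L.foldl pvAppendAt st).2 = st.2 + L.length := by
  induction L generalizing st with
  | nil => simp
  | cons a L ih =>
    simp only [List.foldl_cons, ih, pvAppendAt, List.length_cons]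
    push_cast; ring

theorem step1_get (m : Nat) (st : List (List Int) × Int) (j : Nat) :
    ((List.range m).foldl pvAppendAt st).1[j]? =
      if j < m then st.1[j]?.map (fun r => r ++ [st.2 + (j : Int)]) else st.1[j]? := by
  induction m with
  | zero => simp
  | succ m ih =>
    rw [List.range_succ, List.foldl_append, List.foldl_cons, List.foldl_nil]
    have hsnd := foldl_app_snd (List.range m) st
    simp only [List.length_range] at hsnd
    simp only [pvAppendAt, List.getElem?_modify, hsnd, ih]
    by_cases h1 : j < m
    · simp [h1, Nat.lt_succ_of_lt h1, Nat.ne_of_gt h1]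
    · by_cases h2 : j = m
      · subst h2
        simp
      · have : ¬ j < m + 1 := by omega
        simp [h1, this, Ne.symm h2]

theorem range_map_shift (x : Int) (fuel : Nat) :
    (List.range (fuel + 1)).map (fun (t : Nat) => x + (t : Int)) =
      x :: (List.range fuel).map (fun (t : Nat) => x + 1 + (t : Int)) := by
  induction fuel with
  | zero => simp
  | succ m ih =>
    rw [List.range_succ, List.map_append, ih, List.range_succ, List.map_append]
    simp
    push_cast; ring

theorem fillBottom_spec (fuel : Nat) (idx target : Nat) (st : List (List Int) × Int)
    (r : List Int) (hr : st.1[idx]? = some r) (hlen : r.length + fuel = target) :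
    (pvFillBottom idx target fuel st).2 = st.2 + fuel ∧
    ∀ j, (pvFillBottom idx target fuel st).1[j]? =
      if j = idx then some (r ++ (List.range fuel).map (fun (t : Nat) => st.2 + (t : Int)))
      else st.1[j]? := by
  induction fuel generalizing st r with
  | zero =>
    simp only [pvFillBottom]
    refine ⟨by simp, fun j => ?_⟩
    by_cases h : j = idx
    · subst h; simp [hr]
    · simp [h]
  | succ fuel ih =>
    have hgetD : st.1.getD idx [] = r := by
      rw [List.getD_eq_getElem?_getD, hr]; rfl
    have hcond : (st.1.getD idx []).length ≠ target := by
      rw [hgetD]; omega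
    simp only [pvFillBottom, if_pos hcond]
    have hr' : (pvAppendAt st idx).1[idx]? = some (r ++ [st.2]) := by
      simp [pvAppendAt, List.getElem?_modify, hr]
    have hlen' : (r ++ [st.2]).length + fuel = target := by simp; omega
    obtain ⟨h2, h3⟩ := ih (pvAppendAt st idx) (r ++ [st.2]) hr' hlen'
    constructor
    · rw [h2]; simp [pvAppendAt]; push_cast; ring
    · intro j
      rw [h3 j]
      by_cases h : j = idx
      · subst h
        simp only [if_pos rfl, pvAppendAt]
        rw [range_map_shift st.2 fuel]
        simp [List.append_assoc]
      · simp only [if_neg h, pvAppendAt, List.getElem?_modify]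
        cases st.1[j]? <;> simp [Ne.symm h]

theorem descRange_length (m : Nat) : (pvDescRange m).length = m := by
  induction m with
  | zero => rfl
  | succ m ih => simp [pvDescRange, ih]

theorem step3_get (m : Nat) (st : List (List Int) × Int) (j : Nat) :
    ((pvDescRange m).foldl pvAppendAt st).1[j]? =
      if 1 ≤ j ∧ j ≤ m then st.1[j]?.map (fun r => r ++ [st.2 + ((m : Int) - (j : Int))])
      else st.1[j]? := by
  induction m generalizing st with
  | zero =>
    simp only [pvDescRange, List.foldl_nil]
    have : ¬ (1 ≤ j ∧ j ≤ 0) := by omega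
    rw [if_neg this]
  | succ m ih =>
    simp only [pvDescRange, List.foldl_cons]
    rw [ih]
    by_cases h1 : 1 ≤ j ∧ j ≤ m
    · have hne : m + 1 ≠ j := by omega
      have h2 : 1 ≤ j ∧ j ≤ m + 1 := by omega
      simp only [if_pos h1, if_pos h2, pvAppendAt, List.getElem?_modify]
      cases st.1[j]? with
      | none => simp [hne]
      | some v =>
        have harith : st.2 + 1 + ((m : Int) - (j : Int)) = st.2 + ((m : Int) + 1 - (j : Int)) := by
          ring
        simp [if_neg (by omega : ¬ m + 1 = j), harith]
    · by_cases h2 : j = m + 1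
      · subst h2
        have h3 : 1 ≤ m + 1 ∧ m + 1 ≤ m + 1 := by omega
        simp only [if_neg h1, if_pos h3, pvAppendAt, List.getElem?_modify]
        cases st.1[m+1]? with
        | none => simp
        | some v => simp
      · have h3 : ¬ (1 ≤ j ∧ j ≤ m + 1) := by omega
        simp only [if_neg h1, if_pos, if_neg h3, pvAppendAt, List.getElem?_modify]
        cases st.1[j]? <;> simp [Ne.symm h2]

theorem main_eq (n s : Int) : fill_triangle n s = fill_triangle_alt n s := by
  by_cases hn : n ≤ 0
  · -- n <= 0 : empty array, loop never entered
    have h0 : n.toNat = 0 := Int.toNat_of_nonpos hn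
    have hc : ¬ (s < s + 3 * ((0:Int) - 1) - 1) := by omega
    simp only [fill_triangle, fill_triangle_alt, h0, if_pos hn]
    simp [pvOuter_stop _ _ _ _ , hc, pvOuter]
    rw [if_neg (by omega : ¬ s < s + -3 - 1)]
  · push_neg at hn
    by_cases h1 : n = 1
    · -- n = 1
      subst h1
      have hlt : s < s + 1 := by omega
      have hfuel : (s + 1 - s).toNat = 1 := by omega
      simp only [fill_triangle, fill_triangle_alt]
      norm_num [hfuel, pvOuter, pvFillBottom, pvAppendAt, pvDescRange, List.modify, hlt]
    · -- n >= 2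
      have hn2 : 2 ≤ n := by omega
      have hkn : ((n.toNat : Int)) = n := Int.toNat_of_nonneg (by omega)
      set k := n.toNat with hk
      have hk2 : 2 ≤ k := by omega
      set st0 : List (List Int) × Int := (List.replicate k ([] : List Int), s) with hst0
      set st1 := (List.range (k-1)).foldl pvAppendAt st0 with hst1
      set st2 := pvFillBottom (k-1) k k st1 with hst2
      set st3 := (pvDescRange (k-2)).foldl pvAppendAt st2 with hst3
      have hst1snd : st1.2 = s + ((k:Int) - 1) := by
        rw [hst1, foldl_app_snd]
        simp only [hst0, List.length_range]
        omega
      have hst1get : ∀ j, st1.1[j]? =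
          if j < k-1 then some [s + (j:Int)] else (List.replicate k ([]:List Int))[j]? := by
        intro j
        rw [hst1, step1_get]
        by_cases h : j < k-1
        · simp [h, hst0, List.getElem?_replicate, (by omega : j < k)]
        · simp [h, hst0]
      have hrow : st1.1[k-1]? = some [] := by
        rw [hst1get]
        simp [List.getElem?_replicate, (by omega : k-1 < k)]
      obtain ⟨hst2snd, hst2get⟩ := fillBottom_spec k (k-1) k st1 [] hrow (by simp)
      rw [← hst2] at hst2snd hst2get
      have hst2snd' : st2.2 = s + 2*(k:Int) - 1 := by rw [hst2snd, hst1snd]; ring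
      have hst3snd : st3.2 = s + 3*(k:Int) - 3 := by
        rw [hst3, foldl_app_snd, descRange_length, hst2snd']
        omega
      have hlt : s < s + 3*((k:Int) - 1) - 1 := by omega
      have hstop : ¬ st3.2 < s + 3*((k:Int) - 1) - 1 := by rw [hst3snd]; omega
      have hA : fill_triangle n s = st3.1 := by
        simp only [fill_triangle, ← hk, List.length_replicate,
          if_pos (show (k:Int) ≠ 1 by omega)]
        rw [show (s + 3*((k:Int) - 1) - 1 - s).toNat + 1 = (s + 3*((k:Int) - 1) - 1 - s).toNat + 1 from rfl]
        rw [pvOuter]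
        rw [if_pos hlt]
        simp only [← hst0, ← hst1, ← hst2, ← hst3]
        rw [pvOuter_stop _ _ _ _ hstop]
      rw [hA]
      simp only [fill_triangle_alt, if_neg (by omega : ¬ n ≤ 0), if_neg h1, ← hk]
      refine List.ext_getElem? (fun j => ?_)
      rw [hst3, step3_get]
      by_cases hj0 : j = 0
      · subst hj0
        rw [if_neg (by omega)]
        rw [hst2get 0, if_neg (by omega : ¬ (0:Nat) = k-1), hst1get 0,
          if_pos (by omega : 0 < k-1)]
        simp
      · by_cases hjm : j ≤ k-2
        · rw [if_pos (by omega : 1 ≤ j ∧ j ≤ k-2)]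
          rw [hst2get j, if_neg (by omega : ¬ j = k-1), hst1get j,
            if_pos (by omega : j < k-1)]
          have hidx : (([[s]] : List (List Int)) ++
              (List.range (k-2)).map (fun (i : Nat) => [s + ((i:Int)+1), s + 3*n - 3 - ((i:Int)+1)]) ++
              [(List.range k).map (fun (t : Nat) => s + n - 1 + (t:Int))])[j]? =
              ((List.range (k-2)).map
                (fun (i : Nat) => [s + ((i:Int)+1), s + 3*n - 3 - ((i:Int)+1)]))[j-1]? := by
            rcases Nat.exists_eq_add_of_lt (by omega : 0 < j) with ⟨j', rfl⟩
            simp only [List.append_assoc, List.singleton_append, List.getElem?_cons_succ]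
            rw [List.getElem?_append_left (by simp; omega)]
            simp
          rw [hidx]
          rw [List.getElem?_map, List.getElem?_range (by omega : j-1 < k-2)]
          simp only [Option.map_some, Option.some.injEq]
          have e1 : s + (j:Int) = s + ((((j-1:Nat)):Int) + 1) := by omega
          have e2 : st2.2 + (((k-2:Nat):Int) - (j:Int)) = s + 3*n - 3 - ((((j-1:Nat)):Int) + 1) := by
            rw [hst2snd']; omega
          rw [e2]
          simp [e1]
        · by_cases hjb : j = k-1
          · subst hjb
            rw [if_neg (by omega)]
            rw [hst2get (k-1), if_pos rfl]
            have hidx : (([[s]] : List (List Int)) ++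
                (List.range (k-2)).map (fun (i : Nat) => [s + ((i:Int)+1), s + 3*n - 3 - ((i:Int)+1)]) ++
                [(List.range k).map (fun (t : Nat) => s + n - 1 + (t:Int))])[k-1]? =
                some ((List.range k).map (fun (t : Nat) => s + n - 1 + (t:Int))) := by
              rcases Nat.exists_eq_add_of_lt (by omega : 0 < k-1) with ⟨j', hj'⟩
              rw [hj']
              simp only [List.append_assoc, List.singleton_append, List.getElem?_cons_succ]
              rw [List.getElem?_append_right (by simp; omega)]
              simp only [List.length_cons, List.length_map, List.length_range]
              rw [show 0 + j' + 1 - (k - 2 + 1) = 0 from by omega]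
              rfl
            rw [hidx]
            simp only [List.nil_append, Option.some.injEq]
            refine List.map_congr_left (fun t _ => ?_)
            rw [hst1snd]
            omega
          · -- j >= k : both none
            rw [if_neg (by omega)]
            rw [hst2get j, if_neg (by omega : ¬ j = k-1), hst1get j,
              if_neg (by omega : ¬ j < k-1)]
            rw [List.getElem?_replicate, if_neg (by omega : ¬ j < k)]
            symm
            rw [List.getElem?_eq_none_iff]
            simp
            omega

-- ===== VERDICT (by name: the statement is the Claim_ definition above) =====
theorem fill_triangle_spec : Claim_equal_fill_triangle := by
  intro n s _
  unfold Spec_fill_triangle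
  exact main_eq n s
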